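-- pv_equiv track=rewrite | github.com/mohit421/Personal_Project | Learning/MasterPython_And_DSA/StriverA2ZSheetAndMore/Step4-Binary_Search_1D_2D_SearchSpace/Lec3-BinarySearchOn2DArray/02.RowWithMinimumNOfOnes.py | minRow
-- ===== SOURCE A (Python) =====
-- def minRow(a):
--     #code here
--     ind = 0
--     min_ones = sum(a[0])
--     for i in range(len(a)):
--         min_cnt = sum(a[i])
--         if min_cnt<min_ones:
--             ind, min_ones = i,min_cnt
--     return ind+1
-- ===== SOURCE B (Python) =====
-- def minRow(a):
--     # Divide and conquer: split the rows in half, find (first-min-index, min-sum)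
--     # of each half, combine preferring the left half on ties (= first occurrence).
--     def solve(rows):
--         if len(rows) == 1:
--             return 0, sum(rows[0])
--         mid = len(rows) // 2
--         li, ls = solve(rows[:mid])
--         ri, rs = solve(rows[mid:])
--         return (li, ls) if ls <= rs else (mid + ri, rs)
--     return solve(a)[0] + 1
-- ===== Notes on version B (the rewrite author's own statement) =====
-- stated objective: alternative
-- what changed: Replaces the linear scan with a running (index,min) accumulator by a divide-and-conquer recursion that splits the row list in half and merges the (first-min-index, min-sum) pairs of the halves, preferring the left half on ties.
import Mathlib
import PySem

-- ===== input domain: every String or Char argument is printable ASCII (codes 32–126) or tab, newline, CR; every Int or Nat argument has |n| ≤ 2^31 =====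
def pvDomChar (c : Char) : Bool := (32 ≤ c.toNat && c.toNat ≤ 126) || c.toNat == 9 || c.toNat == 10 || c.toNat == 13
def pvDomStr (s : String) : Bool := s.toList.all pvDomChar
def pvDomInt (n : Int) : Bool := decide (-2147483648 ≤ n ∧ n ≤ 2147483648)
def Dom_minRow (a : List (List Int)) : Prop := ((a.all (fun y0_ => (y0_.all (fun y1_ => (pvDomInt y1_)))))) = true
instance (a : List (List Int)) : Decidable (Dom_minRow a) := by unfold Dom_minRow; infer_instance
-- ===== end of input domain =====

-- B replaces the linear scan with a divide-and-conquer over the halves of the row list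
-- (merging (first-min-index, min-sum) pairs, left half preferred on ties); same cost, not faster.

-- ===== PORT A =====
-- literal port of A: running (ind, min_ones) over i in range(len(a)); a[i] is always
-- in range here, so pyGetD is exact; the [] branch is unreachable (Pre_minRow excludes it:
-- Python raises IndexError on a[0]).
def minRow (a : List (List Int)) : Int :=
  match a with
  | [] => 0
  | r0 :: _ =>
    (((PySem.List.pyRange 0 (a.length : Int) 1).foldl
        (fun (p : Int × Int) i =>
          let min_cnt := (PySem.List.pyGetD a i []).foldl (· + ·) 0
          if min_cnt < p.2 then (i, min_cnt) else p)
        (0, r0.foldl (· + ·) 0)).1) + 1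

-- ===== PORT B =====
-- literal port of B's solve(rows): len(rows)==1 base case (the ≤ 1 guard only makes the
-- recursion total on [], which Pre_minRow excludes: Python recurses forever there);
-- rows[:mid] / rows[mid:] are PySem slices, '//' is floordiv.
def bsolve (rows : List (List Int)) : Int × Int :=
  if _h : rows.length ≤ 1 then
    (0, (PySem.List.pyGetD rows 0 []).foldl (· + ·) 0)
  else
    let mid := PySem.Int.floordiv (rows.length : Int) 2
    let L := bsolve (PySem.List.slice rows none (some mid))
    let R := bsolve (PySem.List.slice rows (some mid) none)
    if L.2 ≤ R.2 then L else (mid + R.1, R.2)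
termination_by rows.length
decreasing_by
  · have hm : PySem.Int.floordiv (rows.length : Int) 2 = ((rows.length / 2 : Nat) : Int) := by
      exact_mod_cast PySem.Int.floordiv_natCast rows.length 2
    rw [hm, PySem.List.slice_to_natCast]
    simp only [List.length_take]
    omega
  · have hm : PySem.Int.floordiv (rows.length : Int) 2 = ((rows.length / 2 : Nat) : Int) := by
      exact_mod_cast PySem.Int.floordiv_natCast rows.length 2
    rw [hm, PySem.List.slice_from_natCast]
    simp only [List.length_drop]
    omega

-- literal port of B: return solve(a)[0] + 1
def minRow_alt (a : List (List Int)) : Int := (bsolve a).1 + 1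

-- ===== PRECONDITION & SPEC =====
-- Pre_ excludes only the empty list, on which Python A raises IndexError (a[0]);
-- B's recursion does not terminate there (RecursionError).
def Pre_minRow (a : List (List Int)) : Prop := a ≠ []
instance (a : List (List Int)) : Decidable (Pre_minRow a) := by unfold Pre_minRow; infer_instance
def pvWitness_minRow : List (List Int) := [[1, 1], [0, 1], [0, 0]]

def Spec_minRow (a : List (List Int)) (out : Int) : Prop := out = minRow_alt a
instance (a : List (List Int)) (out : Int) : Decidable (Spec_minRow a out) := by unfold Spec_minRow; infer_instance

-- ===== CLAIM (what is proved, stated in full; the proofs are below) =====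
def Claim_equal_minRow : Prop := ∀ (a : List (List Int)), Dom_minRow a → Pre_minRow a → Spec_minRow a (minRow a)

-- ===== LEMMAS AND PROOFS =====

-- row sum and "minimum of a nonempty list" spec functions
def rsum (r : List Int) : Int := r.foldl (· + ·) 0

def mOf : List Int → Int
  | [] => 0
  | x :: t => t.foldl min x

theorem pv_foldl_min_le (t : List Int) : ∀ (mv : Int), t.foldl min mv ≤ mv := by
  induction t with
  | nil => intro mv; simp
  | cons x t ih =>
    intro mv
    simp only [List.foldl_cons]
    exact le_trans (ih (min mv x)) (min_le_left mv x)

theorem pv_foldl_min_mem (t : List Int) :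
    ∀ (mv : Int), t.foldl min mv = mv ∨ t.foldl min mv ∈ t := by
  induction t with
  | nil => intro mv; simp
  | cons x t ih =>
    intro mv
    rcases ih (min mv x) with h | h
    · simp only [List.foldl_cons, h]
      rcases le_total mv x with hle | hle
      · left; simp [min_eq_left hle]
      · right; simp [min_eq_right hle]
    · right; simp [List.foldl_cons]; right; exact h

theorem pv_foldl_min_le_mem (t : List Int) :
    ∀ (mv y : Int), y ∈ t → t.foldl min mv ≤ y := by
  induction t with
  | nil => intro mv y h; simp at h
  | cons z t ih =>
    intro mv y h
    rcases List.mem_cons.mp h with h1 | h1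
    · subst h1
      exact le_trans (pv_foldl_min_le t (min mv y)) (min_le_right mv y)
    · exact ih (min mv z) y h1

theorem pv_mOf_mem (l : List Int) (h : l ≠ []) : mOf l ∈ l := by
  match l with
  | x :: t =>
    rcases pv_foldl_min_mem t x with h1 | h1
    · simp [mOf, h1]
    · simp [mOf]; right; exact h1

theorem pv_mOf_le (l : List Int) (y : Int) (hy : y ∈ l) : mOf l ≤ y := by
  match l with
  | x :: t =>
    rcases List.mem_cons.mp hy with h1 | h1
    · subst h1; exact pv_foldl_min_le t y
    · exact pv_foldl_min_le_mem t x y h1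

theorem pv_min_foldl_comm (w : List Int) :
    ∀ (a b : Int), w.foldl min (min a b) = min a (w.foldl min b) := by
  induction w with
  | nil => intro a b; simp
  | cons z w ih =>
    intro a b
    simp only [List.foldl_cons]
    rw [min_assoc, ih a (min b z)]

theorem pv_mOf_append (u v : List Int) (hu : u ≠ []) (hv : v ≠ []) :
    mOf (u ++ v) = min (mOf u) (mOf v) := by
  match u, v with
  | x :: t, y :: w =>
    simp only [mOf, List.cons_append, List.foldl_cons, List.foldl_append]
    rw [pv_min_foldl_comm w (t.foldl min x) y]

theorem pv_enumerate_map {α β : Type} (f : α → β) (xs : List α) :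
    ∀ (k : Int), PySem.List.enumerate (xs.map f) k
      = (PySem.List.enumerate xs k).map (fun p => (p.1, f p.2)) := by
  induction xs with
  | nil => intro k; simp [PySem.List.enumerate_nil]
  | cons x t ih =>
    intro k
    simp [PySem.List.enumerate_cons, ih (k + 1)]

-- A's running-minimum fold keeps the FIRST strict improvement: its invariant
theorem pv_fold_char (t : List Int) :
    ∀ (k j mv : Int),
      (PySem.List.enumerate t k).foldl
          (fun (p : Int × Int) q => if q.2 < p.2 then q else p) (j, mv)
        = if t.foldl min mv < mv
            then (k + (t.idxOf (t.foldl min mv) : Int), t.foldl min mv)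
            else (j, mv) := by
  induction t with
  | nil => intro k j mv; simp [PySem.List.enumerate_nil]
  | cons x t ih =>
    intro k j mv
    rw [PySem.List.enumerate_cons, List.foldl_cons]
    simp only [List.foldl_cons]
    by_cases hx : x < mv
    · have hmin : min mv x = x := min_eq_right (le_of_lt hx)
      rw [if_pos hx, hmin, ih (k + 1) k x]
      by_cases hMx : t.foldl min x < x
      · rw [if_pos hMx, if_pos (lt_trans hMx hx)]
        have hne : x ≠ t.foldl min x := (ne_of_lt hMx).symm
        rw [List.idxOf_cons]
        have hbe : (x == t.foldl min x) = false := by simp [hne]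
        rw [hbe, cond_false]
        simp only [Prod.mk.injEq]
        refine ⟨?_, trivial⟩
        push_cast
        ring
      · rw [if_neg hMx]
        have hMeq : t.foldl min x = x := le_antisymm (pv_foldl_min_le t x) (le_of_not_gt hMx)
        rw [hMeq, if_pos hx, List.idxOf_cons_self]
        simp
    · have hmin : min mv x = mv := min_eq_left (le_of_not_gt hx)
      rw [if_neg hx, hmin, ih (k + 1) j mv]
      by_cases hMlt : t.foldl min mv < mv
      · rw [if_pos hMlt, if_pos hMlt]
        have hne : x ≠ t.foldl min mv := by
          intro h; rw [h] at hx; exact hx hMlt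
        rw [List.idxOf_cons]
        have hbe : (x == t.foldl min mv) = false := by simp [hne]
        rw [hbe, cond_false]
        simp only [Prod.mk.injEq]
        refine ⟨?_, trivial⟩
        push_cast
        ring
      · rw [if_neg hMlt, if_neg hMlt]

-- A's fold over range(len(a)) with a[i] IS the running-minimum fold over the enumerated row sums
theorem pv_portA_eq_enum (a : List (List Int)) (init : Int × Int) :
    (PySem.List.pyRange 0 (a.length : Int) 1).foldl
        (fun (p : Int × Int) i =>
          let min_cnt := (PySem.List.pyGetD a i []).foldl (· + ·) 0
          if min_cnt < p.2 then (i, min_cnt) else p) init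
      = (PySem.List.enumerate (a.map (fun r => r.foldl (· + ·) 0)) 0).foldl
          (fun (p : Int × Int) q => if q.2 < p.2 then q else p) init := by
  rw [pv_enumerate_map, List.foldl_map,
      PySem.List.enumerate_eq_map_pyRange a ([] : List Int), List.foldl_map]
  simp only [PySem.List.len_eq]

-- A returns the first index of the minimal row sum, plus one
theorem pv_portA_char (a : List (List Int)) (h : a ≠ []) :
    minRow a = (((a.map rsum).idxOf (mOf (a.map rsum)) : Nat) : Int) + 1 := by
  match a with
  | r0 :: rest =>
    simp only [minRow, List.map_cons, rsum, mOf]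
    have hrs : rsum = fun r => List.foldl (· + ·) 0 r := rfl
    rw [hrs]
    rw [pv_portA_eq_enum (r0 :: rest) (0, r0.foldl (· + ·) 0)]
    rw [List.map_cons, PySem.List.enumerate_cons, List.foldl_cons]
    rw [if_neg (lt_irrefl ((0 : Int), r0.foldl (· + ·) 0).2)]
    rw [pv_fold_char (rest.map (fun r => r.foldl (· + ·) 0)) (0 + 1) 0 (r0.foldl (· + ·) 0)]
    set s0 := r0.foldl (· + ·) 0 with hs0
    set ts := rest.map (fun r => r.foldl (· + ·) 0) with hts
    by_cases hMlt : List.foldl min s0 ts < s0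
    · rw [if_pos hMlt]
      have hne : s0 ≠ List.foldl min s0 ts := ne_of_gt hMlt
      rw [List.idxOf_cons_ne ts hne]
      simp only []
      push_cast
      ring
    · rw [if_neg hMlt]
      have hMeq : List.foldl min s0 ts = s0 :=
        le_antisymm (pv_foldl_min_le ts s0) (le_of_not_gt hMlt)
      rw [hMeq, List.idxOf_cons_self]
      simp

-- B's divide-and-conquer returns the same (first index of the minimal sum, minimal sum)
theorem pv_bsolve_char (n : Nat) :
    ∀ (rows : List (List Int)), rows.length = n → rows ≠ [] →
      bsolve rows = ((((rows.map rsum).idxOf (mOf (rows.map rsum)) : Nat) : Int),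
                     mOf (rows.map rsum)) := by
  induction n using Nat.strong_induction_on with
  | _ n ih =>
    intro rows hn hne
    rw [bsolve]
    by_cases hle : rows.length ≤ 1
    · rw [dif_pos hle]
      match rows with
      | [r] =>
        simp [PySem.List.pyGetD, PySem.List.pyGet?, PySem.List.pyIdx?, mOf, rsum]
    · rw [dif_neg hle]
      have hm : PySem.Int.floordiv (rows.length : Int) 2 = ((rows.length / 2 : Nat) : Int) := by
        exact_mod_cast PySem.Int.floordiv_natCast rows.length 2
      simp only [hm, PySem.List.slice_to_natCast, PySem.List.slice_from_natCast]
      set mid := rows.length / 2 with hmid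
      have hmid1 : 1 ≤ mid := by omega
      have hmidlt : mid < rows.length := by omega
      have hu : rows.take mid ≠ [] := by
        intro hc
        have := congrArg List.length hc
        simp only [List.length_take, List.length_nil] at this
        omega
      have hv : rows.drop mid ≠ [] := by
        intro hc
        have := congrArg List.length hc
        simp only [List.length_drop, List.length_nil] at this
        omega
      have hLu : (rows.take mid).length < n := by
        simp only [List.length_take]; omega
      have hLv : (rows.drop mid).length < n := by
        simp only [List.length_drop]; omega
      rw [ih _ hLu (rows.take mid) rfl hu, ih _ hLv (rows.drop mid) rfl hv]
      have hsplit : rows.map rsum = (rows.take mid).map rsum ++ (rows.drop mid).map rsum := by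
        rw [← List.map_append, List.take_append_drop]
      set su := (rows.take mid).map rsum with hsu
      set sv := (rows.drop mid).map rsum with hsv
      have hsu_ne : su ≠ [] := by simpa [hsu] using hu
      have hsv_ne : sv ≠ [] := by simpa [hsv] using hv
      have hM : mOf (rows.map rsum) = min (mOf su) (mOf sv) := by
        rw [hsplit]; exact pv_mOf_append su sv hsu_ne hsv_ne
      by_cases hcmp : mOf su ≤ mOf sv
      · rw [if_pos hcmp]
        rw [hM, min_eq_left hcmp, hsplit]
        rw [List.idxOf_append_of_mem (pv_mOf_mem su hsu_ne)]
      · rw [if_neg hcmp]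
        have hlt : mOf sv < mOf su := lt_of_not_ge hcmp
        have hnotmem : mOf sv ∉ su := by
          intro hc
          exact absurd (pv_mOf_le su (mOf sv) hc) (not_le_of_gt hlt)
        rw [hM, min_eq_right (le_of_lt hlt), hsplit]
        rw [List.idxOf_append_of_notMem hnotmem]
        have hsulen : su.length = mid := by
          simp [hsu, List.length_take]; omega
        simp only [Prod.mk.injEq]
        constructor
        · rw [hsulen]; push_cast; ring
        · trivial

-- ===== VERDICT (by name: the statement is the Claim_ definition above) =====
theorem minRow_spec : Claim_equal_minRow := by
  intro a _hdom hpre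
  unfold Spec_minRow minRow_alt
  rw [pv_portA_char a hpre, pv_bsolve_char a.length a rfl hpre]
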